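-- pv_equiv track=rewrite | github.com/dfi/Learning-edX-MITx-6.00.2x | unit_1/unit_1_lecture_2_exercise_1.py | yieldAllCombos
-- ===== SOURCE A (Python) =====
-- def yieldAllCombos(items):
--     '''
--     Generates all combinations of N items into two bags, whereby each
--     item is in one or zero bags.
--
--     Yields a tuple, (bag1, bag2), where each bag is represented as
--     a list of which item(s) are in each bag.
--     '''
--     N = len(items)
--     for i in range(3**N):
--         combo_one = []
--         combo_two = []
--         for j in range(N):
--             temp = i // (3**j) % 3
--             if temp == 1:
--                 combo_one.append(items[j])
--             elif temp == 2:
--                 combo_two.append(items[j])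
--         yield (combo_one, combo_two)
-- ===== SOURCE B (Python) =====
-- def yieldAllCombos(items):
--     '''
--     Generates all combinations of N items into two bags, whereby each
--     item is in one or zero bags.
--
--     Recursive decomposition: gen(n) yields all splits of items[0:n];
--     the OUTER loop is over the choice for the newest item items[n-1],
--     so item 0 varies fastest, matching the base-3 emission order.
--     '''
--     def gen(n):
--         if n == 0:
--             yield ([], [])
--             return
--         x = items[n - 1]
--         for choice in range(3):
--             for b1, b2 in gen(n - 1):
--                 if choice == 0:
--                     yield (b1, b2)
--                 elif choice == 1:
--                     yield (b1 + [x], b2)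
--                 else:
--                     yield (b1, b2 + [x])
--     yield from gen(len(items))
-- ===== Notes on version B (the rewrite author's own statement) =====
-- stated objective: alternative
-- what changed: Replaced the base-3 counting loop that decodes every index i into digits with a recursive generator gen(n) that builds all splits of items[0:n] from gen(n-1), with the choice for the newest item as the outer loop.
import Mathlib
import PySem

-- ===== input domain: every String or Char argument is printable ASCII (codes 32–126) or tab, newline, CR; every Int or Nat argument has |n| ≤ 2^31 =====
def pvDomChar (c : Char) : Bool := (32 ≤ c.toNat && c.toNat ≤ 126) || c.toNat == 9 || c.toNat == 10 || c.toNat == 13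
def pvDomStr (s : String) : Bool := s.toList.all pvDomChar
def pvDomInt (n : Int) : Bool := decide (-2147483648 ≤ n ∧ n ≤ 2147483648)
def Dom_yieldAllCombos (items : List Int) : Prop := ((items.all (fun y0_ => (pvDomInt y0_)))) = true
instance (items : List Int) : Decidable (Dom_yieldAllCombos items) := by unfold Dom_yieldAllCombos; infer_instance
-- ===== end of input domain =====

-- B replaces A's base-3 index-decoding loop with a recursive construction of the
-- splits of items[0:n] from those of items[0:n-1] (objective: alternative decomposition).


-- ===== PORT A =====
-- inner body of A's for-j loop, decoding digit j of i (all quantities are nonneg,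
-- so Nat `/` `%` coincide with Python's `//` `%`; items.getD j 0 is items[j], exact
-- since j < items.length always holds here)
def decodeA (items : List Int) (i : Nat) (n : Nat) : List Int × List Int :=
  (List.range n).foldl
    (fun st j =>
      let temp := i / 3 ^ j % 3
      if temp = 1 then (st.1 ++ [items.getD j 0], st.2)
      else if temp = 2 then (st.1, st.2 ++ [items.getD j 0])
      else st)
    ([], [])

def yieldAllCombos (items : List Int) : List (List Int × List Int) :=
  (List.range (3 ^ items.length)).map (fun i => decodeA items i items.length)

-- ===== PORT B =====
-- B's recursive gen(n): splits of items[0:n]; outer loop = choice for items[n-1]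
def genAlt (items : List Int) : Nat → List (List Int × List Int)
  | 0 => [([], [])]
  | n + 1 =>
    let x := items.getD n 0
    ([0, 1, 2] : List Nat).flatMap (fun choice =>
      (genAlt items n).map (fun p =>
        if choice = 0 then p
        else if choice = 1 then (p.1 ++ [x], p.2)
        else (p.1, p.2 ++ [x])))

def yieldAllCombos_alt (items : List Int) : List (List Int × List Int) :=
  genAlt items items.length

-- ===== PRECONDITION & SPEC =====
def Spec_yieldAllCombos (items : List Int) (out : List (List Int × List Int)) : Prop := out = yieldAllCombos_alt items
instance (items : List Int) (out : List (List Int × List Int)) : Decidable (Spec_yieldAllCombos items out) := by unfold Spec_yieldAllCombos; infer_instance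

-- ===== CLAIM (what is proved, stated in full; the proofs are below) =====
def Claim_equal_yieldAllCombos : Prop := ∀ (items : List Int), Dom_yieldAllCombos items → Spec_yieldAllCombos items (yieldAllCombos items)

-- ===== LEMMAS AND PROOFS =====

theorem decodeA_succ (items : List Int) (i n : Nat) :
    decodeA items i (n + 1) =
      (let st := decodeA items i n
       let temp := i / 3 ^ n % 3
       if temp = 1 then (st.1 ++ [items.getD n 0], st.2)
       else if temp = 2 then (st.1, st.2 ++ [items.getD n 0])
       else st) := by
  simp [decodeA, List.range_succ]

-- folds agree whenever the low digits agree
theorem decodeA_congr (items : List Int) (i i' : Nat) :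
    ∀ n, (∀ j, j < n → i / 3 ^ j % 3 = i' / 3 ^ j % 3) →
      decodeA items i n = decodeA items i' n := by
  intro n
  induction n with
  | zero => intro _; rfl
  | succ m ih =>
    intro h
    rw [decodeA_succ, decodeA_succ, ih (fun j hj => h j (Nat.lt_succ_of_lt hj)),
        h m (Nat.lt_succ_self m)]

theorem digit_lo (q r n j : Nat) (hj : j < n) :
    (q * 3 ^ n + r) / 3 ^ j % 3 = r / 3 ^ j % 3 := by
  have h1 : q * 3 ^ n + r = r + (q * 3 ^ (n - j)) * 3 ^ j := by
    rw [mul_assoc, ← pow_add]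
    have : n - j + j = n := Nat.sub_add_cancel (Nat.le_of_lt hj)
    rw [this]; ring
  rw [h1, Nat.add_mul_div_right _ _ (Nat.pow_pos (by norm_num : 0 < 3))]
  have h2 : q * 3 ^ (n - j) = 3 * (q * 3 ^ (n - j - 1)) := by
    have hnj : 1 ≤ n - j := by omega
    have : 3 ^ (n - j) = 3 * 3 ^ (n - j - 1) := by
      conv_lhs => rw [show n - j = 1 + (n - j - 1) by omega]
      rw [pow_add, pow_one]
    rw [this]; ring
  rw [h2]
  omega

theorem digit_hi (q r n : Nat) (hr : r < 3 ^ n) (hq : q < 3) :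
    (q * 3 ^ n + r) / 3 ^ n % 3 = q := by
  rw [Nat.add_comm, Nat.add_mul_div_right _ _ (Nat.pow_pos (by norm_num : 0 < 3)),
      Nat.div_eq_of_lt hr]
  simp [Nat.mod_eq_of_lt hq]

theorem decodeA_block (items : List Int) (q r n : Nat) (hr : r < 3 ^ n) (hq : q < 3) :
    decodeA items (q * 3 ^ n + r) (n + 1) =
      (let st := decodeA items r n
       if q = 1 then (st.1 ++ [items.getD n 0], st.2)
       else if q = 2 then (st.1, st.2 ++ [items.getD n 0])
       else st) := by
  rw [decodeA_succ, digit_hi q r n hr hq,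
      decodeA_congr items _ r n (fun j hj => digit_lo q r n j hj)]

theorem map_decodeA_eq_genAlt (items : List Int) :
    ∀ n, (List.range (3 ^ n)).map (fun i => decodeA items i n) = genAlt items n := by
  intro n
  induction n with
  | zero => simp [decodeA, genAlt]
  | succ m ih =>
    have hsplit : List.range (3 ^ (m + 1)) =
        List.range (3 ^ m) ++ (List.range (3 ^ m)).map (fun r => 1 * 3 ^ m + r)
          ++ (List.range (3 ^ m)).map (fun r => 2 * 3 ^ m + r) := by
      have h1 : (3 : Nat) ^ (m + 1) = (3 ^ m + 3 ^ m) + 3 ^ m := by ring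
      rw [h1, List.range_add, List.range_add]
      congr 1
      · congr 1
        apply List.map_congr_left; intro r _; omega
      · apply List.map_congr_left; intro r _; omega
    rw [hsplit]
    simp only [List.map_append, List.map_map]
    have hb0 : (List.range (3 ^ m)).map (fun i => decodeA items i (m + 1)) =
        (genAlt items m) := by
      rw [← ih]
      apply List.map_congr_left
      intro r hr
      have hr' : r < 3 ^ m := List.mem_range.mp hr
      have := decodeA_block items 0 r m hr' (by norm_num)
      simpa using this
    have hb1 : (List.range (3 ^ m)).map ((fun i => decodeA items i (m + 1)) ∘ (fun r => 1 * 3 ^ m + r)) =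
        (genAlt items m).map (fun p => (p.1 ++ [items.getD m 0], p.2)) := by
      rw [← ih, List.map_map]
      apply List.map_congr_left
      intro r hr
      have hr' : r < 3 ^ m := List.mem_range.mp hr
      have := decodeA_block items 1 r m hr' (by norm_num)
      simpa using this
    have hb2 : (List.range (3 ^ m)).map ((fun i => decodeA items i (m + 1)) ∘ (fun r => 2 * 3 ^ m + r)) =
        (genAlt items m).map (fun p => (p.1, p.2 ++ [items.getD m 0])) := by
      rw [← ih, List.map_map]
      apply List.map_congr_left
      intro r hr
      have hr' : r < 3 ^ m := List.mem_range.mp hr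
      have := decodeA_block items 2 r m hr' (by norm_num)
      simpa using this
    rw [hb0, hb1, hb2]
    simp [genAlt, List.flatMap_cons]

-- ===== VERDICT (by name: the statement is the Claim_ definition above) =====
theorem yieldAllCombos_spec : Claim_equal_yieldAllCombos := by
  intro items _
  unfold Spec_yieldAllCombos yieldAllCombos yieldAllCombos_alt
  exact map_decodeA_eq_genAlt items items.length
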